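-- pv_equiv track=rewrite | github.com/alexcaldarone/leetcode_solutions | leetcode/3649_number_perfect_pairs.py | perfectPairs
-- ===== SOURCE A (Python) =====
-- from typing import List
--
-- def perfectPairs(nums: List[int]) -> int:
--     nums_abs = sorted(abs(x) for x in nums)
--
--     res = 0
--     r = 1
--     for l in range(0, len(nums_abs)-1):
--
--         while r < len(nums_abs) and nums_abs[r] <= 2*nums_abs[l]:
--             r += 1
--
--         res += (r - l - 1)
--
--     return res
-- ===== SOURCE B (Python) =====
-- from typing import List
-- import bisect
--
-- def perfectPairs(nums: List[int]) -> int: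
--     nums_abs = sorted(abs(x) for x in nums)
--     res = 0
--     for l in range(len(nums_abs) - 1):
--         res += bisect.bisect_right(nums_abs, 2 * nums_abs[l]) - l - 1
--     return res
-- ===== Notes on version B (the rewrite author's own statement) =====
-- stated objective: idiomatic
-- what changed: Replaces the stateful monotone two-pointer sweep (a pointer carried across iterations with an inner while loop) with an independent binary search (bisect_right) per element over the sorted absolute values.
import Mathlib
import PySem

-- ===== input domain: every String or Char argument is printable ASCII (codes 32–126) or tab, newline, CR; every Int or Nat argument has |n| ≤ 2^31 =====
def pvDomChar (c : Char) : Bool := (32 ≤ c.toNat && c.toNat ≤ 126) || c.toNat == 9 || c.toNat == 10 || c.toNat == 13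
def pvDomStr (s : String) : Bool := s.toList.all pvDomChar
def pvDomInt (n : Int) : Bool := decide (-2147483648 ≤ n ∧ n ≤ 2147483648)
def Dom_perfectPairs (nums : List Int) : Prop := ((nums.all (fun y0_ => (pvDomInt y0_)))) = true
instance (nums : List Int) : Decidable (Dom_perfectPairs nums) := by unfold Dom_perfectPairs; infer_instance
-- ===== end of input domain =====

-- B replaces A's stateful monotone two-pointer sweep by an independent bisect_right
-- binary search per element (idiomatic; same O(n log n) cost).

-- ===== PORT A =====
-- the inner 'while r < len(nums_abs) and nums_abs[r] <= 2*nums_abs[l]: r += 1' loop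
def pvAdvance (a : List Int) (t : Int) (r : Nat) : Nat :=
  if h : r < a.length then
    if a[r] ≤ t then pvAdvance a t (r + 1) else r
  else r
termination_by a.length - r

def perfectPairs (nums : List Int) : Int :=
  let a := PySem.List.sorted (nums.map (fun x => |x|)) (fun x => x) false
  (((List.range (a.length - 1)).foldl
      (fun (st : Int × Nat) (l : Nat) =>
        let r := pvAdvance a (2 * a.getD l 0) st.2
        (st.1 + ((r : Int) - (l : Int) - 1), r))
      (0, 1))).1

-- ===== PORT B =====
def perfectPairs_alt (nums : List Int) : Int :=
  let a := PySem.List.sorted (nums.map (fun x => |x|)) (fun x => x) false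
  (List.range (a.length - 1)).foldl
    (fun res l =>
      res + ((PySem.List.bisectRight a (2 * a.getD l 0) : Int) - (l : Int) - 1))
    0

-- ===== PRECONDITION & SPEC =====
def Spec_perfectPairs (nums : List Int) (out : Int) : Prop := out = perfectPairs_alt nums
instance (nums : List Int) (out : Int) : Decidable (Spec_perfectPairs nums out) := by unfold Spec_perfectPairs; infer_instance

-- ===== CLAIM (what is proved, stated in full; the proofs are below) =====
def Claim_equal_perfectPairs : Prop := ∀ (nums : List Int), Dom_perfectPairs nums → Spec_perfectPairs nums (perfectPairs nums)

-- ===== LEMMAS AND PROOFS =====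

-- bisect_right is monotone in the probe value (consequence of bisectRight_spec)
theorem pvBr_mono (a : List Int) (hs : a.Pairwise (· ≤ ·)) {t t' : Int} (h : t ≤ t') :
    PySem.List.bisectRight a t ≤ PySem.List.bisectRight a t' := by
  obtain ⟨hle, hlt, hgt⟩ := PySem.List.bisectRight_spec a t hs
  obtain ⟨hle', hlt', hgt'⟩ := PySem.List.bisectRight_spec a t' hs
  by_contra hc
  have hc : PySem.List.bisectRight a t' < PySem.List.bisectRight a t := Nat.lt_of_not_le hc
  have hj : PySem.List.bisectRight a t' < a.length := lt_of_lt_of_le hc hle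
  have h1 := hlt _ hj hc
  have h2 := hgt' _ hj le_rfl
  omega

-- fuel-indexed form of the statement below
theorem pvAdvance_eq_aux (a : List Int) (hs : a.Pairwise (· ≤ ·)) (t : Int) :
    ∀ (k r : Nat), a.length - r ≤ k → r ≤ PySem.List.bisectRight a t →
      pvAdvance a t r = PySem.List.bisectRight a t := by
  obtain ⟨hle, hlt, hgt⟩ := PySem.List.bisectRight_spec a t hs
  intro k
  induction k with
  | zero =>
    intro r hk h
    have hr : ¬ r < a.length := by omega
    rw [pvAdvance, dif_neg hr]
    omega
  | succ k ih =>
    intro r hk h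
    rcases lt_or_eq_of_le h with hlt' | heq
    · have hr : r < a.length := lt_of_lt_of_le hlt' hle
      rw [pvAdvance, dif_pos hr, if_pos (hlt r hr hlt')]
      exact ih (r + 1) (by omega) hlt'
    · rw [pvAdvance]
      rcases Nat.lt_or_ge r a.length with hr | hr
      · rw [dif_pos hr, if_neg (not_le.mpr (hgt r hr (le_of_eq heq.symm)))]
        exact heq
      · rw [dif_neg (not_lt.mpr hr)]
        exact heq

-- the two-pointer inner while loop lands exactly on bisect_right, whenever it starts at or below it
theorem pvAdvance_eq (a : List Int) (hs : a.Pairwise (· ≤ ·)) (t : Int) (r : Nat)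
    (h : r ≤ PySem.List.bisectRight a t) : pvAdvance a t r = PySem.List.bisectRight a t :=
  pvAdvance_eq_aux a hs t a.length r (by omega) h

-- sorted list: earlier elements are ≤ later ones
theorem pvMono (a : List Int) (hs : a.Pairwise (· ≤ ·)) {i j : Nat} (hij : i ≤ j)
    (hj : j < a.length) : a[i]'(lt_of_le_of_lt hij hj) ≤ a[j] := by
  rcases lt_or_eq_of_le hij with hlt | heq
  · exact (List.pairwise_iff_getElem.mp hs) i j _ hj hlt
  · subst heq; exact le_rfl

-- the loop invariant: after k iterations A's accumulator equals B's, and A's pointer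
-- is at or below every remaining bisect_right target
theorem pvInv (a : List Int) (hs : a.Pairwise (· ≤ ·)) (hnn : ∀ x ∈ a, 0 ≤ x)
    (k : Nat) (hk : k ≤ a.length - 1) :
    ((List.range k).foldl
        (fun (st : Int × Nat) (l : Nat) =>
          let r := pvAdvance a (2 * a.getD l 0) st.2
          (st.1 + ((r : Int) - (l : Int) - 1), r)) (0, 1)).1
      = (List.range k).foldl
          (fun res l =>
            res + ((PySem.List.bisectRight a (2 * a.getD l 0) : Int) - (l : Int) - 1)) 0
    ∧ ∀ l, k ≤ l → l < a.length →
        ((List.range k).foldl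
          (fun (st : Int × Nat) (l : Nat) =>
            let r := pvAdvance a (2 * a.getD l 0) st.2
            (st.1 + ((r : Int) - (l : Int) - 1), r)) (0, 1)).2
        ≤ PySem.List.bisectRight a (2 * a.getD l 0) := by
  induction k with
  | zero =>
    refine ⟨rfl, ?_⟩
    intro l _ hl
    simp only [List.range_zero, List.foldl_nil]
    -- 1 ≤ bisectRight: a[0] ≤ 2*a[l] so index 0 is strictly below the insertion point
    obtain ⟨hle, hlt, hgt⟩ := PySem.List.bisectRight_spec a (2 * a.getD l 0) hs
    by_contra hc
    have hc : PySem.List.bisectRight a (2 * a.getD l 0) = 0 := by omega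
    have h0 : 0 < a.length := by omega
    have hgd : a.getD l 0 = a[l] := List.getD_eq_getElem a 0 hl
    have h1 : a[0] ≤ a[l] := pvMono a hs (Nat.zero_le l) hl
    have h2 : 0 ≤ a[l] := hnn _ (List.getElem_mem hl)
    have h3 := hgt 0 h0 (by omega)
    rw [hgd] at h3
    omega
  | succ k ih =>
    have hk' : k ≤ a.length - 1 := Nat.le_of_succ_le hk
    have hkn : k < a.length := by omega
    obtain ⟨ih1, ih2⟩ := ih hk'
    have hadv : pvAdvance a (2 * a.getD k 0)
        (((List.range k).foldl
          (fun (st : Int × Nat) (l : Nat) =>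
            let r := pvAdvance a (2 * a.getD l 0) st.2
            (st.1 + ((r : Int) - (l : Int) - 1), r)) (0, 1)).2)
        = PySem.List.bisectRight a (2 * a.getD k 0) :=
      pvAdvance_eq a hs _ _ (ih2 k le_rfl hkn)
    rw [List.range_succ, List.foldl_append, List.foldl_append]
    constructor
    · simp only [List.foldl_cons, List.foldl_nil, hadv, ih1]
    · intro l hl hln
      simp only [List.foldl_cons, List.foldl_nil, hadv]
      apply pvBr_mono a hs
      have hgk : a.getD k 0 = a[k] := List.getD_eq_getElem a 0 hkn
      have hgl : a.getD l 0 = a[l] := List.getD_eq_getElem a 0 hln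
      rw [hgk, hgl]
      have := pvMono a hs (Nat.le_of_succ_le hl) hln
      omega

-- ===== VERDICT (by name: the statement is the Claim_ definition above) =====
theorem perfectPairs_spec : Claim_equal_perfectPairs := by
  intro nums _
  unfold Spec_perfectPairs perfectPairs perfectPairs_alt
  have hs : (PySem.List.sorted (nums.map (fun x => |x|)) (fun x => x) false).Pairwise (· ≤ ·) :=
    PySem.List.sorted_pairwise (nums.map (fun x => |x|)) (fun x => x)
  have hnn : ∀ x ∈ PySem.List.sorted (nums.map (fun x => |x|)) (fun x => x) false, 0 ≤ x := by
    intro x hx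
    rw [PySem.List.mem_sorted] at hx
    obtain ⟨y, _, rfl⟩ := List.mem_map.mp hx
    exact abs_nonneg y
  exact (pvInv _ hs hnn _ le_rfl).1
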